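-- pv_equiv track=rewrite | github.com/posl/comment_recommendation | script/mod_gen/3_time/en/279_A/7.py | getBottoms
-- ===== SOURCE A (Python) =====
-- def getBottoms(s):
--     bottoms = 0
--     v = 0
--     w = 0
--     for i in range(len(s)):
--         if s[i] == 'v':
--             v += 1
--         elif s[i] == 'w':
--             w += 1
--         if v > w:
--             bottoms += 1
--     return bottoms
-- ===== SOURCE B (Python) =====
-- def getBottoms(s):
--     # Event compression: only 'v'/'w' characters change the v-w balance, so
--     # collect those positions as events, then add the length of each whole
--     # segment [event, next event) whose balance is positive.
--     n = len(s)
--     events = [(i, 1 if c == 'v' else -1) for i, c in enumerate(s) if c in ('v', 'w')]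
--     nexts = [i for i, _ in events[1:]] + [n]
--     total = 0
--     bal = 0
--     for (i, d), nxt in zip(events, nexts):
--         bal += d
--         if bal > 0:
--             total += nxt - i
--     return total
-- ===== Notes on version B (the rewrite author's own statement) =====
-- stated objective: alternative
-- what changed: Event-compression/run-length algorithm: extracts only the balance-changing characters as (index, delta) events, pairs each event with the next event's index, and adds whole segment lengths (next - i) for segments with positive balance, instead of A's per-character counter loop that tests v > w at every position.
import Mathlib
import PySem

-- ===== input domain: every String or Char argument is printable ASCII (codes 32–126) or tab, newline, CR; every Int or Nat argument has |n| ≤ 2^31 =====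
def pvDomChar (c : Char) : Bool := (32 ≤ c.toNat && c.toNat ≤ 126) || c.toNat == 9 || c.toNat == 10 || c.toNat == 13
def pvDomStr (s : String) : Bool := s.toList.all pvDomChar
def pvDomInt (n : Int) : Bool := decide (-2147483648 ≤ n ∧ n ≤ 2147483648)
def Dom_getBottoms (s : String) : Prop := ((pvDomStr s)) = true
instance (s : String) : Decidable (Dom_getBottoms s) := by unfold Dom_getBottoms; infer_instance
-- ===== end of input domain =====

-- B replaces A's per-character counter loop by event compression: it extracts the
-- 'v'/'w' positions as (index, delta) events and adds whole segment lengths at once.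
-- ===== PORT A =====
def pvStepA (st : Int × Int × Int) (c : Char) : Int × Int × Int :=
  let (bottoms, v, w) := st
  let v := if c = 'v' then v + 1 else v
  let w := if c ≠ 'v' ∧ c = 'w' then w + 1 else w
  let bottoms := if v > w then bottoms + 1 else bottoms
  (bottoms, v, w)

def getBottoms (s : String) : Int :=
  (s.toList.foldl pvStepA (0, 0, 0)).1

-- ===== PORT B =====
-- the comprehension over enumerate(s): keep (index, +1/-1) for 'v'/'w' characters
def pvEvts (i : Int) : List Char → List (Int × Int)
  | [] => []
  | c :: tl =>
      if c = 'v' then (i, 1) :: pvEvts (i + 1) tl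
      else if c = 'w' then (i, -1) :: pvEvts (i + 1) tl
      else pvEvts (i + 1) tl

-- the for-loop over zip(events, nexts) with accumulators (total, bal)
def pvFoldB : List ((Int × Int) × Int) → Int → Int → Int
  | [], total, _ => total
  | ((i, d), nxt) :: rest, total, bal =>
      let bal' := bal + d
      pvFoldB rest (if 0 < bal' then total + (nxt - i) else total) bal'

def getBottoms_alt (s : String) : Int :=
  let l := s.toList
  let n : Int := l.length
  let events := pvEvts 0 l
  let nexts := (events.drop 1).map Prod.fst ++ [n]
  pvFoldB (events.zip nexts) 0 0

-- ===== PRECONDITION & SPEC =====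
def Spec_getBottoms (s : String) (out : Int) : Prop := out = getBottoms_alt s
instance (s : String) (out : Int) : Decidable (Spec_getBottoms s out) := by unfold Spec_getBottoms; infer_instance

-- ===== CLAIM (what is proved, stated in full; the proofs are below) =====
def Claim_equal_getBottoms : Prop := ∀ (s : String), Dom_getBottoms s → Spec_getBottoms s (getBottoms s)

-- ===== LEMMAS AND PROOFS =====

-- reference count: number of positions whose running balance (bal + prefix delta) is positive
def pvS : List Char → Int → Int
  | [], _ => 0
  | c :: tl, bal =>
      let bal' := bal + (if c = 'v' then 1 else if c = 'w' then -1 else 0)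
      (if 0 < bal' then 1 else 0) + pvS tl bal'

-- number of leading non-event characters
def pvLead : List Char → Int
  | [] => 0
  | c :: tl => if c = 'v' ∨ c = 'w' then 0 else 1 + pvLead tl

lemma pvLead_nonneg (l : List Char) : 0 ≤ pvLead l := by
  induction l with
  | nil => simp [pvLead]
  | cons c tl ih => simp only [pvLead]; split_ifs <;> omega

lemma pv_A_eq (l : List Char) (b v w : Int) :
    (l.foldl pvStepA (b, v, w)).1 = b + pvS l (v - w) := by
  induction l generalizing b v w with
  | nil => simp [pvS]
  | cons c tl ih =>
    simp only [List.foldl_cons, pvStepA, pvS]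
    rw [ih]
    split_ifs <;> simp_all <;> (try ring_nf) <;> omega

-- head index of the event list (default: one past the end) is start + leading gap
lemma pvEvts_headIdx (i0 : Int) (l : List Char) :
    (((pvEvts i0 l).map Prod.fst).headD (i0 + l.length)) = i0 + pvLead l := by
  induction l generalizing i0 with
  | nil => simp [pvEvts, pvLead]
  | cons c tl ih =>
    by_cases hv : c = 'v'
    · simp [pvEvts, pvLead, hv]
    · by_cases hw : c = 'w'
      · simp [pvEvts, pvLead, hw]
      · have hc : ¬(c = 'v' ∨ c = 'w') := by tauto
        simp only [pvEvts, pvLead, if_neg hv, if_neg hw, if_neg hc, List.length_cons]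
        have := ih (i0 + 1)
        push_cast
        rw [show (i0 : Int) + (↑tl.length + 1) = (i0 + 1) + ↑tl.length by ring, this]
        ring

-- no events ⇒ every character is neutral, so pvS counts all-or-nothing and lead = length
lemma pvEvts_nil_S (l : List Char) (i0 : Int) (h : pvEvts i0 l = []) (bal : Int) :
    pvS l bal = (if 0 < bal then (l.length : Int) else 0) ∧ pvLead l = l.length := by
  induction l generalizing i0 with
  | nil => simp [pvS, pvLead]
  | cons c tl ih =>
    by_cases h1 : c = 'v'
    · rw [pvEvts, if_pos h1] at h; simp at h
    · by_cases h2 : c = 'w'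
      · rw [pvEvts, if_neg h1, if_pos h2] at h; simp at h
      · rw [pvEvts, if_neg h1, if_neg h2] at h
        have hc : ¬(c = 'v' ∨ c = 'w') := by tauto
        have := ih (i0 + 1) h
        simp only [pvS, pvLead, if_neg hc, List.length_cons]
        rw [if_neg h1, if_neg h2, add_zero]
        constructor
        · rw [this.1]; split_ifs <;> push_cast <;> ring
        · rw [this.2]; push_cast; ring

-- main loop invariant: the B fold computes the reference count minus the (uncounted)
-- leading gap when the incoming balance is positive
lemma pv_B_eq (l : List Char) (i0 : Int) (t bal : Int) :
    pvFoldB ((pvEvts i0 l).zip (((pvEvts i0 l).drop 1).map Prod.fst ++ [i0 + l.length])) t bal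
      = t + pvS l bal - (if 0 < bal then pvLead l else 0) := by
  induction l generalizing i0 t bal with
  | nil => simp [pvEvts, pvFoldB, pvS, pvLead]
  | cons c tl ih =>
    by_cases hc : c = 'v' ∨ c = 'w'
    · have hd : (if c = 'v' then (1:Int) else if c = 'w' then -1 else 0)
          = if c = 'v' then 1 else -1 := by
        rcases hc with h | h <;> simp [h]
      set d : Int := if c = 'v' then 1 else -1 with hdd
      have hev : pvEvts i0 (c :: tl) = (i0, d) :: pvEvts (i0 + 1) tl := by
        rcases hc with h | h
        · simp [pvEvts, h, hdd]
        · by_cases hv : c = 'v'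
          · simp [pvEvts, hv, hdd]
          · simp [pvEvts, h, hdd]
      have hS : pvS (c :: tl) bal = (if 0 < bal + d then 1 else 0) + pvS tl (bal + d) := by
        simp only [pvS, hd, hdd]
      have hlead : pvLead (c :: tl) = 0 := by simp [pvLead, hc]
      rw [hev, hS, hlead]
      cases hE : pvEvts (i0 + 1) tl with
      | nil =>
        have hn := pvEvts_nil_S tl (i0 + 1) hE (bal + d)
        simp only [List.drop_succ_cons, List.drop_nil, List.map_nil, List.nil_append,
          List.zip_cons_cons, List.zip_nil_left, pvFoldB, List.length_cons]
        rw [hn.1]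
        split_ifs <;> push_cast <;> ring
      | cons e es =>
        have hhead : e.1 = (i0 + 1) + pvLead tl := by
          have := pvEvts_headIdx (i0 + 1) tl
          rw [hE] at this; simpa using this
        have hes : List.map Prod.fst es
            = List.map Prod.fst ((pvEvts (i0 + 1) tl).drop 1) := by rw [hE]; simp
        simp only [List.drop_succ_cons, List.drop_zero, List.map_cons, List.cons_append,
          List.zip_cons_cons, pvFoldB, List.length_cons]
        rw [show (i0 : Int) + ((tl.length + 1 : Nat) : Int) = (i0 + 1) + ↑tl.length by
            push_cast; ring,
          hes, ← hE, ih (i0 + 1)]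
        have hln := pvLead_nonneg tl
        split_ifs <;> (try rw [hhead]) <;> omega
    · have hev : pvEvts i0 (c :: tl) = pvEvts (i0 + 1) tl := by
        simp only [not_or] at hc; simp [pvEvts, hc.1, hc.2]
      have hS : pvS (c :: tl) bal = (if 0 < bal then 1 else 0) + pvS tl bal := by
        simp only [not_or] at hc; simp [pvS, hc.1, hc.2]
      have hlead : pvLead (c :: tl) = 1 + pvLead tl := by simp [pvLead, hc]
      have hlen : (i0 : Int) + (c :: tl).length = (i0 + 1) + tl.length := by
        simp; ring
      rw [hev, hS, hlead, hlen, ih (i0 + 1)]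
      split_ifs <;> ring

-- ===== VERDICT (by name: the statement is the Claim_ definition above) =====
theorem getBottoms_spec : Claim_equal_getBottoms := by
  intro s _
  unfold Spec_getBottoms getBottoms getBottoms_alt
  rw [pv_A_eq s.toList 0 0 0]
  have hB := pv_B_eq s.toList 0 0 0
  simp at hB ⊢
  exact hB.symm
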